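-- pv_equiv track=rewrite | github.com/NicholasLiem/kubescale | src/mltps/playground/finalize.py | group_consecutive_peaks
-- ===== SOURCE A (Python) =====
-- def group_consecutive_peaks(peak_indices, max_gap=2):
--     """Group consecutive peak indices together."""
--     if len(peak_indices) == 0:
--         return []
--     groups = []
--     current_group = [peak_indices[0]]
--     for i in range(1, len(peak_indices)):
--         if peak_indices[i] - peak_indices[i-1] <= max_gap:
--             current_group.append(peak_indices[i])
--         else:
--             groups.append(current_group)
--             current_group = [peak_indices[i]]
--     groups.append(current_group)
--     return groups
-- ===== SOURCE B (Python) =====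
-- def group_consecutive_peaks(peak_indices, max_gap=2):
--     """Group peaks by first listing cut positions, then slicing between boundaries."""
--     n = len(peak_indices)
--     if n == 0:
--         return []
--     cuts = [i for i in range(1, n) if peak_indices[i] - peak_indices[i - 1] > max_gap]
--     bounds = [0] + cuts + [n]
--     return [list(peak_indices[s:e]) for s, e in zip(bounds, bounds[1:])]
-- ===== Notes on version B (the rewrite author's own statement) =====
-- stated objective: alternative
-- what changed: B is a staged pipeline: first a comprehension collects the cut positions where the gap exceeds max_gap, then groups are produced by slicing the input between consecutive boundaries, instead of A's single loop flushing a running current_group accumulator.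
import Mathlib
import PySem

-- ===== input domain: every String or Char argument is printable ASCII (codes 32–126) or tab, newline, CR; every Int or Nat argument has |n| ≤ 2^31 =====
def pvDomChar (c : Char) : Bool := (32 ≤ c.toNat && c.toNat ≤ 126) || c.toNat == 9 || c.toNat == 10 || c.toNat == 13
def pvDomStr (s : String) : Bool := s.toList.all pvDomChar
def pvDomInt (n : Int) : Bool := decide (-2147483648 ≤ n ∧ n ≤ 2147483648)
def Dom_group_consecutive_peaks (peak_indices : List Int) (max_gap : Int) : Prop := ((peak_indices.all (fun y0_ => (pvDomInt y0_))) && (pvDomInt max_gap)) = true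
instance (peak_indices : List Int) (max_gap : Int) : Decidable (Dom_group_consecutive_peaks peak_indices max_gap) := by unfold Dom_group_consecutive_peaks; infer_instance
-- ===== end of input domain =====

-- B replaces A's running-accumulator loop by a staged pipeline (collect cut positions, then slice between boundaries); objective: alternative decomposition, same cost.


-- ===== PORT A =====
def group_consecutive_peaks (peak_indices : List Int) (max_gap : Int) : List (List Int) :=
  if peak_indices.length = 0 then []
  else
    -- groups = [], current_group = [peak_indices[0]]; loop i in range(1, len)
    let st := (PySem.List.pyRange 1 peak_indices.length 1).foldl
      (fun (st : List (List Int) × List Int) i =>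
        if PySem.List.pyGetD peak_indices i 0 - PySem.List.pyGetD peak_indices (i-1) 0 ≤ max_gap
        then (st.1, st.2 ++ [PySem.List.pyGetD peak_indices i 0])
        else (st.1 ++ [st.2], [PySem.List.pyGetD peak_indices i 0]))
      ([], [PySem.List.pyGetD peak_indices 0 0])
    st.1 ++ [st.2]

-- ===== PORT B =====
def group_consecutive_peaks_alt (peak_indices : List Int) (max_gap : Int) : List (List Int) :=
  if peak_indices.length = 0 then []
  else
    -- cuts = [i for i in range(1,n) if gap at i > max_gap]; bounds = [0]+cuts+[n]; slices between consecutive bounds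
    let cuts := (PySem.List.pyRange 1 peak_indices.length 1).filter
      (fun i => decide (PySem.List.pyGetD peak_indices i 0 - PySem.List.pyGetD peak_indices (i-1) 0 > max_gap))
    let bounds := (0 : Int) :: (cuts ++ [(peak_indices.length : Int)])
    (bounds.zip bounds.tail).map (fun se => PySem.List.slice peak_indices (some se.1) (some se.2))

-- ===== PRECONDITION & SPEC =====
def Spec_group_consecutive_peaks (peak_indices : List Int) (max_gap : Int) (out : List (List Int)) : Prop := out = group_consecutive_peaks_alt peak_indices max_gap
instance (peak_indices : List Int) (max_gap : Int) (out : List (List Int)) : Decidable (Spec_group_consecutive_peaks peak_indices max_gap out) := by unfold Spec_group_consecutive_peaks; infer_instance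

-- ===== CLAIM (what is proved, stated in full; the proofs are below) =====
def Claim_equal_group_consecutive_peaks : Prop := ∀ (peak_indices : List Int) (max_gap : Int), Dom_group_consecutive_peaks peak_indices max_gap → Spec_group_consecutive_peaks peak_indices max_gap (group_consecutive_peaks peak_indices max_gap)

-- ===== LEMMAS AND PROOFS =====

-- common abstract form: remaining elements t, current group cur whose last element is prev
def consume (g : Int) (cur : List Int) (prev : Int) : List Int → List (List Int)
  | [] => [cur]
  | x :: t => if x - prev ≤ g then consume g (cur ++ [x]) x t else cur :: consume g [x] x t

theorem slice_succ (ps : List Int) (s j : Nat) (hsj : s ≤ j) (hj : j < ps.length) :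
    PySem.List.slice ps (some (s : Int)) (some ((j : Int) + 1))
      = PySem.List.slice ps (some (s : Int)) (some (j : Int)) ++ [ps.getD j 0] := by
  have h1 : ((j : Int) + 1) = ((j + 1 : Nat) : Int) := by push_cast; ring
  rw [h1, PySem.List.slice_natCast, PySem.List.slice_natCast]
  have h2 : j + 1 - s = (j - s) + 1 := by omega
  rw [h2, List.take_add_one]
  congr 1
  rw [List.getElem?_drop]
  have h3 : s + (j - s) = j := by omega
  rw [h3, List.getElem?_eq_getElem hj, List.getD_eq_getElem ps 0 hj]
  rfl

theorem slice_singleton (ps : List Int) (j : Nat) (hj : j < ps.length) :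
    PySem.List.slice ps (some (j : Int)) (some ((j : Int) + 1)) = [ps.getD j 0] := by
  rw [slice_succ ps j j (le_refl j) hj, PySem.List.slice_natCast]
  simp

-- A's indexed fold, seen from index j onward, is `consume` on the dropped suffix
theorem foldA_eq_consume (ps : List Int) (g : Int) : ∀ (k : Nat) (j : Nat) (gs : List (List Int)) (cur : List Int),
    1 ≤ j → j ≤ ps.length → k = ps.length - j →
    (let st := (PySem.List.pyRange (j : Int) ps.length 1).foldl
      (fun (st : List (List Int) × List Int) i =>
        if PySem.List.pyGetD ps i 0 - PySem.List.pyGetD ps (i-1) 0 ≤ g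
        then (st.1, st.2 ++ [PySem.List.pyGetD ps i 0])
        else (st.1 ++ [st.2], [PySem.List.pyGetD ps i 0])) (gs, cur)
     st.1 ++ [st.2]) = gs ++ consume g cur (ps.getD (j-1) 0) (ps.drop j) := by
  intro k
  induction k with
  | zero =>
    intro j gs cur h1 h2 hk
    have hj : j = ps.length := by omega
    subst hj
    rw [PySem.List.pyRange_one_eq_nil (by omega)]
    simp [consume]
  | succ k ih =>
    intro j gs cur h1 h2 hk
    have hjlt : j < ps.length := by omega
    rw [PySem.List.pyRange_one_cons (by exact_mod_cast hjlt)]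
    have hget : PySem.List.pyGetD ps (j : Int) 0 = ps.getD j 0 := by
      simp [PySem.List.pyGetD_natCast]
    have hget' : PySem.List.pyGetD ps ((j : Int) - 1) 0 = ps.getD (j-1) 0 := by
      have : (j : Int) - 1 = ((j - 1 : Nat) : Int) := by omega
      rw [this]; simp [PySem.List.pyGetD_natCast]
    have hdrop : ps.drop j = ps.getD j 0 :: ps.drop (j+1) := by
      rw [List.getD_eq_getElem ps 0 hjlt, List.drop_eq_getElem_cons hjlt]
    have hnext : ((j : Int) + 1) = ((j + 1 : Nat) : Int) := by push_cast; ring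
    by_cases hle : ps.getD j 0 - ps.getD (j-1) 0 ≤ g
    · simp only [List.foldl_cons, hget, hget', if_pos hle, hnext]
      rw [ih (j+1) gs (cur ++ [ps.getD j 0]) (by omega) (by omega) (by omega)]
      rw [hdrop, consume, if_pos hle]
      congr 2
    · simp only [List.foldl_cons, hget, hget', if_neg hle, hnext]
      rw [ih (j+1) (gs ++ [cur]) [ps.getD j 0] (by omega) (by omega) (by omega)]
      rw [hdrop, consume, if_neg hle]
      simp only [List.append_assoc, List.cons_append, List.nil_append]
      congr 3

-- B's boundary pipeline, seen from index j onward with pending start s, is the same `consume`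
theorem cuts_eq_consume (ps : List Int) (g : Int) : ∀ (k : Nat) (j : Nat) (s : Nat),
    1 ≤ j → j ≤ ps.length → s ≤ j → k = ps.length - j →
    (let t := ((PySem.List.pyRange (j : Int) ps.length 1).filter
        (fun i => decide (PySem.List.pyGetD ps i 0 - PySem.List.pyGetD ps (i-1) 0 > g))) ++ [(ps.length : Int)]
     (((s : Int) :: t).zip t).map (fun se => PySem.List.slice ps (some se.1) (some se.2)))
    = consume g (PySem.List.slice ps (some (s : Int)) (some (j : Int))) (ps.getD (j-1) 0) (ps.drop j) := by
  intro k
  induction k with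
  | zero =>
    intro j s h1 h2 hs hk
    have hj : j = ps.length := by omega
    subst hj
    rw [PySem.List.pyRange_one_eq_nil (by omega)]
    simp [consume]
  | succ k ih =>
    intro j s h1 h2 hs hk
    have hjlt : j < ps.length := by omega
    rw [PySem.List.pyRange_one_cons (by exact_mod_cast hjlt)]
    have hget : PySem.List.pyGetD ps (j : Int) 0 = ps.getD j 0 := by
      simp [PySem.List.pyGetD_natCast]
    have hget' : PySem.List.pyGetD ps ((j : Int) - 1) 0 = ps.getD (j-1) 0 := by
      have : (j : Int) - 1 = ((j - 1 : Nat) : Int) := by omega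
      rw [this]; simp [PySem.List.pyGetD_natCast]
    have hdrop : ps.drop j = ps.getD j 0 :: ps.drop (j+1) := by
      rw [List.getD_eq_getElem ps 0 hjlt, List.drop_eq_getElem_cons hjlt]
    have hnext : ((j : Int) + 1) = ((j + 1 : Nat) : Int) := by push_cast; ring
    by_cases hgt : ps.getD j 0 - ps.getD (j-1) 0 > g
    · -- j is a cut: it heads the filtered list, emitting the slice [s:j], then restart at j
      simp only [List.filter_cons, hget, hget', decide_eq_true_eq, if_pos hgt, hnext]
      have hIH := ih (j+1) j (by omega) (by omega) (by omega) (by omega)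
      simp only at hIH ⊢
      rw [List.cons_append, List.zip_cons_cons, List.map_cons]
      rw [show ((j : Int) :: ((PySem.List.pyRange ((j:Nat)+1 : Nat) ps.length 1).filter
            (fun i => decide (PySem.List.pyGetD ps i 0 - PySem.List.pyGetD ps (i-1) 0 > g)) ++ [(ps.length : Int)])).zip
            ((PySem.List.pyRange ((j:Nat)+1 : Nat) ps.length 1).filter
            (fun i => decide (PySem.List.pyGetD ps i 0 - PySem.List.pyGetD ps (i-1) 0 > g)) ++ [(ps.length : Int)]) =
          ((j : Int) :: ((PySem.List.pyRange ((j:Nat)+1 : Nat) ps.length 1).filter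
            (fun i => decide (PySem.List.pyGetD ps i 0 - PySem.List.pyGetD ps (i-1) 0 > g)) ++ [(ps.length : Int)])).zip
            (((PySem.List.pyRange ((j:Nat)+1 : Nat) ps.length 1).filter
            (fun i => decide (PySem.List.pyGetD ps i 0 - PySem.List.pyGetD ps (i-1) 0 > g)) ++ [(ps.length : Int)])) from rfl]
      rw [hdrop, consume, if_neg (by omega)]
      congr 1
      have hIH' := hIH
      rw [show ((j+1 : Nat) : Int) = (j : Int) + 1 by push_cast; ring] at hIH'
      rw [slice_singleton ps j hjlt] at hIH'
      have hj1 : (j + 1) - 1 = j := by omega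
      rw [hj1] at hIH'
      exact hIH'
    · -- j is not a cut: same pending start s, the group simply extends
      simp only [List.filter_cons, hget, hget', decide_eq_true_eq, if_neg hgt, hnext]
      have hIH := ih (j+1) s (by omega) (by omega) (by omega) (by omega)
      simp only at hIH ⊢
      rw [hdrop, consume, if_pos (by omega)]
      rw [show ((j+1 : Nat) : Int) = (j : Int) + 1 by push_cast; ring] at hIH
      rw [slice_succ ps s j hs hjlt] at hIH
      have hj1 : (j + 1) - 1 = j := by omega
      rw [hj1] at hIH
      exact hIH

-- ===== VERDICT (by name: the statement is the Claim_ definition above) =====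
theorem group_consecutive_peaks_spec : Claim_equal_group_consecutive_peaks := by
  intro ps g _
  unfold Spec_group_consecutive_peaks
  cases ps with
  | nil => rfl
  | cons a rest =>
    unfold group_consecutive_peaks group_consecutive_peaks_alt
    rw [if_neg (by simp), if_neg (by simp)]
    have hA := foldA_eq_consume (a :: rest) g rest.length 1 [] [PySem.List.pyGetD (a :: rest) 0 0]
      (by omega) (by simp) (by simp)
    have hB := cuts_eq_consume (a :: rest) g rest.length 1 0
      (by omega) (by simp) (by omega) (by simp)
    simp only [Nat.cast_one, Nat.cast_zero] at hA hB
    refine hA.trans (Eq.trans ?_ hB.symm)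
    have hget0 : PySem.List.pyGetD (a :: rest) (0 : Int) 0 = a := by
      simp [PySem.List.pyGetD_zero_cons]
    have hs01 : PySem.List.slice (a :: rest) (some (0 : Int)) (some (1 : Int)) = [a] := by
      have := slice_singleton (a :: rest) 0 (by simp)
      simpa using this
    rw [hget0, hs01, List.nil_append]
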